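-- pv_equiv track=rewrite | github.com/pypi-data/pypi-mirror-400 | packages/fluxem/fluxem-1.0.1.tar.gz/fluxem-1.0.1/fluxem/domains/music/atonal.py | normal_form
-- ===== SOURCE A (Python) =====
-- from typing import Any, List, Tuple
--
-- def normal_form(pcs: List[int]) -> List[int]:
--     """
--     Compute normal form of a pitch class set.
--
--     Normal form = most compact left-packed rotation.
--
--     Reference implementation of a common normal-form heuristic.
--     """
--     if not pcs:
--         return []
--
--     # Generate all rotations
--     rotations = []
--     sorted_pcs = sorted(set(pc % 12 for pc in pcs))
--
--     for i in range(12):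
--         rotated = [((pc - i) % 12) for pc in sorted_pcs]
--         rotations.append(rotated)
--
--     # Find most compact (minimizes span between first and last)
--     def span(rotation):
--         if len(rotation) == 1:
--             return 0
--         return (rotation[-1] - rotation[0]) % 12
--
--     min_span = min(span(r) for r in rotations)
--     candidates = [r for r in rotations if span(r) == min_span]
--
--     # Choose leftmost (lexicographically smallest)
--     return min(candidates)
-- ===== SOURCE B (Python) =====
-- def normal_form(pcs):
--     """Closed form: the lexicographically smallest transposition is the one
--     starting at 0, i.e. transpose the sorted distinct pitch classes by their
--     minimum. No rotation loop, no span computation, no min over candidates."""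
--     sorted_pcs = sorted({pc % 12 for pc in pcs})
--     if not sorted_pcs:
--         return []
--     t0 = sorted_pcs[0]
--     return [(pc - t0) % 12 for pc in sorted_pcs]
-- ===== Notes on version B (the rewrite author's own statement) =====
-- stated objective: simpler
-- what changed: B replaces A's 12-transposition generation, span computation, candidate filter and lexicographic min by the closed form [(pc - min) % 12 for pc in sorted set]: the span is invariant under transposition so all 12 rotations are candidates, and the unique transposition starting at 0 is the lexicographic minimum.
import Mathlib
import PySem

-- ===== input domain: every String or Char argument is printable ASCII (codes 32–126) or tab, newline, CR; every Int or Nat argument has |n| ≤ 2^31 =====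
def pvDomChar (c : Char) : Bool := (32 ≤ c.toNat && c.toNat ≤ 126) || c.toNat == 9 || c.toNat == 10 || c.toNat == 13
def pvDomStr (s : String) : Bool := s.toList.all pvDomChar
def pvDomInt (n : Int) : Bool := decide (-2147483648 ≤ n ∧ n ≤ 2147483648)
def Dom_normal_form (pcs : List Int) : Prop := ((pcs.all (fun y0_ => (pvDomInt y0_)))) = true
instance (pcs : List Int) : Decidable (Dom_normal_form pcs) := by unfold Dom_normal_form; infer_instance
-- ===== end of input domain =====

-- B computes the normal form by a closed form (transpose the sorted distinct pitch
-- classes by their minimum) instead of A's min over 12 generated transpositions.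

-- ===== PORT A =====
-- span helper of A ('def span(rotation)' inside normal_form)
def pvSpan (r : List Int) : Int :=
  if r.length = 1 then 0
  else PySem.Int.mod (PySem.List.pyGetD r (-1) 0 - PySem.List.pyGetD r 0 0) 12

def normal_form (pcs : List Int) : List Int :=
  if pcs = [] then []
  else
    let sorted_pcs := PySem.List.sorted
      (PySem.Set.ofList (pcs.map (fun pc => PySem.Int.mod pc 12))) (fun x => x)
    let rotations := (PySem.List.pyRange 0 12 1).foldl
      (fun rs i => rs ++ [sorted_pcs.map (fun pc => PySem.Int.mod (pc - i) 12)]) []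
    -- min() of the generator of spans; the generator is never empty (12 rotations),
    -- so Python's min never raises and .getD is unreachable
    let min_span := (PySem.List.min? (rotations.map pvSpan) (fun x => x)).getD 0
    let candidates := rotations.filter (fun r => pvSpan r == min_span)
    -- min(candidates); candidates is never empty
    (PySem.List.min? candidates (fun x => x)).getD []

-- ===== PORT B =====
def normal_form_alt (pcs : List Int) : List Int :=
  let sorted_pcs := PySem.List.sorted
    (PySem.Set.ofList (pcs.map (fun pc => PySem.Int.mod pc 12))) (fun x => x)
  match sorted_pcs with
  | [] => []
  | t0 :: rest => (t0 :: rest).map (fun pc => PySem.Int.mod (pc - t0) 12)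

-- ===== PRECONDITION & SPEC =====
def Spec_normal_form (pcs : List Int) (out : List Int) : Prop := out = normal_form_alt pcs
instance (pcs : List Int) (out : List Int) : Decidable (Spec_normal_form pcs out) := by unfold Spec_normal_form; infer_instance

-- ===== CLAIM (what is proved, stated in full; the proofs are below) =====
def Claim_equal_normal_form : Prop := ∀ (pcs : List Int), Dom_normal_form pcs → Spec_normal_form pcs (normal_form pcs)

-- ===== LEMMAS AND PROOFS =====

-- the transposition of s by i
def pvRot (s : List Int) (i : Int) : List Int := s.map (fun pc => PySem.Int.mod (pc - i) 12)

theorem pvSpan_rot_const (s : List Int) (i j : Int) : pvSpan (pvRot s i) = pvSpan (pvRot s j) := by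
  cases s with
  | nil => rfl
  | cons m t =>
    cases t with
    | nil => rfl
    | cons u v =>
      simp only [pvSpan, pvRot, PySem.List.pyGetD, PySem.List.pyGet?_neg_one, PySem.List.pyGet?_zero,
        List.getLast?_map, List.length_map]
      have hlen : (m :: u :: v).length ≠ 1 := by simp
      simp only [if_neg hlen]
      have hL : (m :: u :: v).getLast? = some ((m :: u :: v).getLast (by simp)) :=
        List.getLast?_eq_some_getLast (by simp)
      simp only [hL, Option.map_some, Option.getD_some, List.map_cons, List.getElem?_cons_zero]
      have h12 : (0:Int) < 12 := by norm_num
      simp only [PySem.Int.mod_eq_emod_of_pos h12]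
      omega

theorem pvRot_head_lt (s : List Int) (m : Int) (t : List Int) (i : Int)
    (hs : s = m :: t) (hm : 0 ≤ m ∧ m < 12) (hi : 0 ≤ i ∧ i < 12) (hne : i ≠ m) :
    pvRot s m < pvRot s i := by
  subst hs
  simp only [pvRot, List.map_cons]
  have h0 : PySem.Int.mod (m - m) 12 = 0 := by
    simp only [sub_self]
    decide
  have hpos : 0 < PySem.Int.mod (m - i) 12 := by
    have h12 : (0:Int) < 12 := by norm_num
    have hnn := PySem.Int.mod_nonneg (m - i) h12
    rcases lt_or_eq_of_le hnn with h | h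
    · exact h
    · exfalso
      have hdvd : (12:Int) ∣ (m - i) := (PySem.Int.mod_eq_zero_iff_dvd (m - i) 12).mp h.symm
      omega
  rw [h0]
  exact List.Lex.rel (by omega)

-- Python's min(xs) returns x when x is a member strictly below every other element
theorem foldl_min_keep {α : Type} [LT α] [DecidableLT α] {x : α} {xs : List α}
    (h : ∀ y ∈ xs, ¬ y < x) :
    xs.foldl (fun acc y => match acc with
      | none => some y
      | some m => if y < m then some y else some m) (some x) = some x := by
  induction xs with
  | nil => rfl
  | cons y t ih =>
    simp only [List.foldl_cons]
    rw [if_neg (h y List.mem_cons_self)]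
    exact ih (fun z hz => h z (List.mem_cons_of_mem _ hz))

theorem foldl_min_strict {α : Type} [LT α] [DecidableLT α]
    (hirr : ∀ a : α, ¬ a < a) (hasym : ∀ a b : α, a < b → ¬ b < a)
    {x : α} {xs : List α} {a : α}
    (hmem : x ∈ xs) (hstrict : ∀ y ∈ xs, y ≠ x → x < y) (hxa : x < a) :
    xs.foldl (fun acc y => match acc with
      | none => some y
      | some m => if y < m then some y else some m) (some a) = some x := by
  induction xs generalizing a with
  | nil => exact absurd hmem (List.not_mem_nil)
  | cons y t ih =>
    simp only [List.foldl_cons]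
    by_cases hyx : y = x
    · subst hyx
      rw [if_pos hxa]
      apply foldl_min_keep
      intro z hz
      by_cases hzx : z = y
      · subst hzx; exact hirr z
      · exact fun h2 => absurd (hstrict z (List.mem_cons_of_mem _ hz) hzx) (hasym _ _ h2)
    · have hxmem : x ∈ t := by
        rcases List.mem_cons.mp hmem with h | h
        · exact absurd h.symm hyx
        · exact h
      have hxy : x < y := hstrict y List.mem_cons_self hyx
      have hst : ∀ z ∈ t, z ≠ x → x < z :=
        fun z hz => hstrict z (List.mem_cons_of_mem _ hz)
      by_cases hya : y < a
      · rw [if_pos hya]; exact ih hxmem hst hxy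
      · rw [if_neg hya]; exact ih hxmem hst hxa

theorem min?_eq_of_strict_min {α : Type} [LT α] [DecidableLT α]
    (hirr : ∀ a : α, ¬ a < a) (hasym : ∀ a b : α, a < b → ¬ b < a)
    {x : α} {xs : List α}
    (hmem : x ∈ xs) (hstrict : ∀ y ∈ xs, y ≠ x → x < y) :
    PySem.List.min? xs (fun r => r) = some x := by
  unfold PySem.List.min?
  cases xs with
  | nil => exact absurd hmem (List.not_mem_nil)
  | cons y t =>
    simp only [List.foldl_cons]
    by_cases hyx : y = x
    · subst hyx
      apply foldl_min_keep
      intro z hz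
      by_cases hzx : z = y
      · subst hzx; exact hirr z
      · exact fun h2 => absurd (hstrict z (List.mem_cons_of_mem _ hz) hzx) (hasym _ _ h2)
    · have hxmem : x ∈ t := by
        rcases List.mem_cons.mp hmem with h | h
        · exact absurd h.symm hyx
        · exact h
      exact foldl_min_strict hirr hasym hxmem (fun z hz => hstrict z (List.mem_cons_of_mem _ hz))
        (hstrict y List.mem_cons_self hyx)

theorem normal_form_eq (pcs : List Int) : normal_form pcs = normal_form_alt pcs := by
  by_cases hnil : pcs = []
  · subst hnil; rfl
  · unfold normal_form normal_form_alt
    simp only [if_neg hnil]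
    set s := PySem.List.sorted
      (PySem.Set.ofList (pcs.map (fun pc => PySem.Int.mod pc 12))) (fun x => x) with hs
    -- s is nonempty
    have hsne : s ≠ [] := by
      obtain ⟨p, hp⟩ := List.exists_mem_of_ne_nil pcs hnil
      have h1 : PySem.Int.mod p 12 ∈ pcs.map (fun pc => PySem.Int.mod pc 12) :=
        List.mem_map_of_mem hp
      have h2 : PySem.Int.mod p 12 ∈ s := by
        rw [hs, PySem.List.mem_sorted, PySem.Set.mem_ofList]
        exact h1
      exact List.ne_nil_of_mem h2
    -- every element of s is in [0, 12)
    have hbound : ∀ x ∈ s, 0 ≤ x ∧ x < 12 := by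
      intro x hx
      rw [hs, PySem.List.mem_sorted, PySem.Set.mem_ofList] at hx
      obtain ⟨p, _, hp⟩ := List.mem_map.mp hx
      have h12 : (0:Int) < 12 := by norm_num
      exact hp ▸ ⟨PySem.Int.mod_nonneg p h12, PySem.Int.mod_lt p h12⟩
    obtain ⟨m, t, hst⟩ := List.exists_cons_of_ne_nil hsne
    have hm := hbound m (by rw [hst]; exact List.mem_cons_self)
    -- the fold building rotations is a map
    have hrots : (PySem.List.pyRange 0 12 1).foldl
        (fun rs i => rs ++ [s.map (fun pc => PySem.Int.mod (pc - i) 12)]) []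
        = (PySem.List.pyRange 0 12 1).map (pvRot s) := by
      simpa [pvRot] using PySem.List.foldl_append_singleton_eq_map (pvRot s) (PySem.List.pyRange 0 12 1) []
    rw [hrots]
    set rng := PySem.List.pyRange 0 12 1 with hrng
    -- all spans are equal, so min_span = pvSpan of any rotation and candidates = rotations
    have hc : ∀ r ∈ (rng.map (pvRot s)).map pvSpan, r = pvSpan (pvRot s 0) := by
      intro r hr
      simp only [List.map_map, List.mem_map, Function.comp] at hr
      obtain ⟨i, _, hi⟩ := hr
      rw [← hi]; exact pvSpan_rot_const s i 0
    have hmapne : (rng.map (pvRot s)).map pvSpan ≠ [] := by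
      simp only [ne_eq, List.map_eq_nil_iff]
      rw [hrng]
      decide
    have hms : (PySem.List.min? ((rng.map (pvRot s)).map pvSpan) (fun x => x)).getD 0
        = pvSpan (pvRot s 0) := by
      cases hx : PySem.List.min? ((rng.map (pvRot s)).map pvSpan) (fun x => x) with
      | none => exact absurd ((PySem.List.min?_eq_none_iff _ _).mp hx) hmapne
      | some v => simpa using hc v (PySem.List.min?_mem hx)
    rw [hms]
    have hfilter : (rng.map (pvRot s)).filter (fun r => pvSpan r == pvSpan (pvRot s 0))
        = rng.map (pvRot s) := by
      apply List.filter_eq_self.mpr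
      intro r hr
      obtain ⟨i, _, hi⟩ := List.mem_map.mp hr
      rw [beq_iff_eq, ← hi]
      exact pvSpan_rot_const s i 0
    rw [hfilter]
    -- the lexicographic min of the rotations is the transposition by m
    have hmmem : pvRot s m ∈ rng.map (pvRot s) := by
      apply List.mem_map_of_mem
      rw [hrng, PySem.List.mem_pyRange_one]
      exact ⟨hm.1, hm.2⟩
    have hstrict : ∀ y ∈ rng.map (pvRot s), y ≠ pvRot s m → pvRot s m < y := by
      intro y hy hyne
      obtain ⟨i, hi, hiy⟩ := List.mem_map.mp hy
      rw [hrng, PySem.List.mem_pyRange_one] at hi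
      have hine : i ≠ m := by
        intro h; exact hyne (by rw [← hiy, h])
      rw [← hiy]
      exact pvRot_head_lt s m t i hst hm ⟨hi.1, hi.2⟩ hine
    rw [min?_eq_of_strict_min (fun a => List.lt_irrefl a) (fun a b h => List.lt_asymm h) hmmem hstrict]
    simp only [Option.getD_some]
    rw [hst]
    rfl

-- ===== VERDICT (by name: the statement is the Claim_ definition above) =====
theorem normal_form_spec : Claim_equal_normal_form := by
  intro pcs _
  unfold Spec_normal_form
  exact normal_form_eq pcs
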